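-- pv_equiv track=rewrite | github.com/dsav123/medproc | medproc/algo.py | specsympt
-- ===== SOURCE A (Python) =====
-- import itertools
-- from collections import Counter, OrderedDict
--
-- def counting(data):
--     return Counter(data)
--
-- def specsympt(dataset, sympt):
--     a = [list(group) for k, group in itertools.groupby(dataset, lambda x: x[0])]
--     counterholder = []
--     test = []
--     for c in a:
--         for d in c:
--             test.append(d[1])
--         counterholder.append((d[0], counting(test)))
--         test = []
--
--     symptcount = []
--     for i in counterholder:
--         symptcount.append((i[0], i[1][sympt]))
--
--     return symptcount
-- ===== SOURCE B (Python) =====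
-- def specsympt(dataset, sympt):
--     # Single explicit pass: running (previous key, count) state, flushed on key change.
--     res = []
--     prev = None
--     cnt = 0
--     for key, val in dataset:
--         if prev is None or key != prev:
--             if prev is not None:
--                 res.append((prev, cnt))
--             prev = key
--             cnt = 0
--         if val == sympt:
--             cnt += 1
--     if prev is not None:
--         res.append((prev, cnt))
--     return res
-- ===== Notes on version B (the rewrite author's own statement) =====
-- stated objective: simpler
-- what changed: Replaced the groupby-into-lists + per-group Counter + second mapping pass with a single explicit pass that keeps a (previous key, running count) state and flushes on key change.
import Mathlib
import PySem

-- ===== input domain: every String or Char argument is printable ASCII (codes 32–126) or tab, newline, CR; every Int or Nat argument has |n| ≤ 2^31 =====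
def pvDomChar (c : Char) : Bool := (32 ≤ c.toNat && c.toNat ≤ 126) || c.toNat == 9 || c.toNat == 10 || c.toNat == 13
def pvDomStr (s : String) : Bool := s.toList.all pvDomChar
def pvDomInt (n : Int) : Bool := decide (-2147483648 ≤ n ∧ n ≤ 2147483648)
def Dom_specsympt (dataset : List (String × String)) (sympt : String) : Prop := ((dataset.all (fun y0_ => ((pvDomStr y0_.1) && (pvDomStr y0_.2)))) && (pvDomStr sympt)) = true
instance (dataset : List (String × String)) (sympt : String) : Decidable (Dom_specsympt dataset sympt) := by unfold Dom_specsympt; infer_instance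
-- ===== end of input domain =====

-- B replaces itertools.groupby + Counter with one explicit pass keeping a (previous key, running count) state (objective: simpler).

-- ===== PORT A =====
-- itertools.groupby splits into maximal consecutive runs of equal keys;
-- pvGroupRun takes the run of elements whose first component equals k, returning (run, rest).
def pvGroupRun (k : String) : List (String × String) → List (String × String) × List (String × String)
  | [] => ([], [])
  | x :: xs =>
      if x.1 = k then
        let p := pvGroupRun k xs
        (x :: p.1, p.2)
      else ([], x :: xs)

theorem pvGroupRun_rest_le (k : String) (xs : List (String × String)) :
    (pvGroupRun k xs).2.length ≤ xs.length := by
  induction xs with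
  | nil => simp [pvGroupRun]
  | cons x xs ih =>
      simp only [pvGroupRun]
      split
      · simpa using Nat.le_succ_of_le ih
      · simp

def pvGroupBy : List (String × String) → List (List (String × String))
  | [] => []
  | x :: xs =>
      (x :: (pvGroupRun x.1 xs).1) :: pvGroupBy (pvGroupRun x.1 xs).2
termination_by xs => xs.length
decreasing_by
  exact Nat.lt_succ_of_le (pvGroupRun_rest_le x.1 xs)

-- a = [list(group) for k, group in groupby(dataset, lambda x: x[0])]; then the two loops of A,
-- each building its list by append; Counter(test) is PySem.Dict.counter; i[1][sympt] is Counter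
-- lookup, which returns 0 for a missing key (Counter.__missing__), hence getD sympt 0.
-- (d[0] after the inner loop is the first component of the LAST element of the group.)
def specsympt (dataset : List (String × String)) (sympt : String) : List (String × Int) :=
  let a := pvGroupBy dataset
  let counterholder := a.foldl (fun acc c =>
      let test := c.foldl (fun t d => t ++ [d.2]) []
      acc ++ [((c.getLast?.map Prod.fst).getD "", PySem.Dict.counter test)]) []
  counterholder.foldl (fun acc i => acc ++ [(i.1, i.2.getD sympt 0)]) []

-- ===== PORT B =====
-- one loop iteration of Source B: flush on key change, then count the matching value
def pvStepB (sympt : String) (st : Option String × Int × List (String × Int))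
    (x : String × String) : Option String × Int × List (String × Int) :=
  let st' : Option String × Int × List (String × Int) :=
    match st.1 with
    | none => (some x.1, 0, st.2.2)
    | some p => if x.1 = p then st else (some x.1, 0, st.2.2 ++ [(p, st.2.1)])
  (st'.1, st'.2.1 + (if x.2 = sympt then 1 else 0), st'.2.2)

def specsympt_alt (dataset : List (String × String)) (sympt : String) : List (String × Int) :=
  let st := dataset.foldl (pvStepB sympt) (none, 0, [])
  match st.1 with
  | none => st.2.2
  | some p => st.2.2 ++ [(p, st.2.1)]

-- ===== PRECONDITION & SPEC =====
def Spec_specsympt (dataset : List (String × String)) (sympt : String) (out : List (String × Int)) : Prop := out = specsympt_alt dataset sympt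
instance (dataset : List (String × String)) (sympt : String) (out : List (String × Int)) : Decidable (Spec_specsympt dataset sympt out) := by unfold Spec_specsympt; infer_instance

-- ===== CLAIM (what is proved, stated in full; the proofs are below) =====
def Claim_equal_specsympt : Prop := ∀ (dataset : List (String × String)) (sympt : String), Dom_specsympt dataset sympt → Spec_specsympt dataset sympt (specsympt dataset sympt)

-- ===== LEMMAS AND PROOFS =====

-- count of matching symptoms in a group, as B accumulates it
def pvCnt (sympt : String) (c : List (String × String)) : Int :=
  ((c.map Prod.snd).count sympt : Int)

theorem pvCnt_cons (sympt : String) (x : String × String) (c : List (String × String)) :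
    pvCnt sympt (x :: c) = (if x.2 = sympt then 1 else 0) + pvCnt sympt c := by
  by_cases h : x.2 = sympt <;> simp [pvCnt, h] <;> omega

-- every element of the run extracted for key k has first component k
theorem pvGroupRun_keys (k : String) (xs : List (String × String)) :
    ∀ y ∈ (pvGroupRun k xs).1, y.1 = k := by
  induction xs with
  | nil => simp [pvGroupRun]
  | cons x xs ih =>
      simp only [pvGroupRun]
      split
      · intro y hy
        rcases (List.mem_cons.mp hy) with h | h
        · simp [h]; assumption
        · exact ih y h
      · simp

-- A's first foldl over a single group, rewritten via foldl_append_singleton_eq_map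
theorem pvA_eq_map (dataset : List (String × String)) (sympt : String) :
    specsympt dataset sympt =
      (pvGroupBy dataset).map
        (fun c => ((c.getLast?.map Prod.fst).getD "", pvCnt sympt c)) := by
  unfold specsympt
  simp only [PySem.List.foldl_append_singleton_eq_map, List.nil_append, List.map_map]
  congr 1
  funext c
  simp [Function.comp, PySem.Dict.getD_counter, pvCnt]

-- B's final flush, as in specsympt_alt
def pvFlush (st : Option String × Int × List (String × Int)) : List (String × Int) :=
  match st.1 with
  | none => st.2.2
  | some p => st.2.2 ++ [(p, st.2.1)]

theorem pvAlt_eq_flush (dataset : List (String × String)) (sympt : String) :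
    specsympt_alt dataset sympt = pvFlush (dataset.foldl (pvStepB sympt) (none, 0, [])) := rfl

-- B's loop starting mid-run: processing xs from state (some k, cnt, res) first finishes the
-- run of key k, then handles the remaining groups
theorem pvB_run (sympt : String) (xs : List (String × String)) :
    ∀ (k : String) (cnt : Int) (res : List (String × Int)),
      pvFlush (xs.foldl (pvStepB sympt) (some k, cnt, res)) =
      res ++ [(k, cnt + pvCnt sympt (pvGroupRun k xs).1)] ++
        ((pvGroupBy (pvGroupRun k xs).2).map
          (fun c => (match c.head? with | some d => d.1 | none => "", pvCnt sympt c))) := by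
  induction xs with
  | nil => intro k cnt res; simp [pvGroupRun, pvGroupBy, pvCnt, pvFlush]
  | cons x xs ih =>
      intro k cnt res
      by_cases hk : x.1 = k
      · have hstep : pvStepB sympt (some k, cnt, res) x =
            (some k, cnt + (if x.2 = sympt then 1 else 0), res) := by
          simp [pvStepB, hk]
        simp only [List.foldl_cons, hstep, pvGroupRun, if_pos hk]
        rw [ih k (cnt + (if x.2 = sympt then 1 else 0)) res]
        rw [pvCnt_cons]
        ring_nf
      · have hstep : pvStepB sympt (some k, cnt, res) x =
            (some x.1, (0:Int) + (if x.2 = sympt then 1 else 0), res ++ [(k, cnt)]) := by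
          simp [pvStepB, hk]
        simp only [List.foldl_cons, hstep, pvGroupRun, if_neg hk]
        rw [ih x.1 _ (res ++ [(k, cnt)])]
        rw [pvGroupBy]
        simp [pvCnt_cons, pvCnt]
        by_cases h : x.2 = sympt <;> simp [List.count_cons, h] <;> push_cast <;> omega

-- B computes the per-run counts keyed by each run's FIRST element
theorem pvB_eq_map (dataset : List (String × String)) (sympt : String) :
    specsympt_alt dataset sympt =
      (pvGroupBy dataset).map
        (fun c => (match c.head? with | some d => d.1 | none => "", pvCnt sympt c)) := by
  cases dataset with
  | nil => simp [specsympt_alt, pvGroupBy]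
  | cons x xs =>
      rw [pvAlt_eq_flush]
      have hstep : pvStepB sympt (none, 0, []) x =
          (some x.1, (0:Int) + (if x.2 = sympt then 1 else 0), []) := by
        simp [pvStepB]
      simp only [List.foldl_cons, hstep]
      rw [pvB_run sympt xs x.1 ((0:Int) + (if x.2 = sympt then 1 else 0)) []]
      rw [pvGroupBy]
      simp [pvCnt_cons]

-- within each run of pvGroupBy, the first and last element share the same first component
theorem pvKeys_agree (dataset : List (String × String)) :
    ∀ c ∈ pvGroupBy dataset,
      ((c.getLast?.map Prod.fst).getD "") =
        (match c.head? with | some d => d.1 | none => "") := by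
  induction dataset using pvGroupBy.induct with
  | case1 => simp [pvGroupBy]
  | case2 x xs ih =>
      rw [pvGroupBy]
      intro c hc
      rcases List.mem_cons.mp hc with rfl | hc
      · have hne : x :: (pvGroupRun x.1 xs).1 ≠ [] := by simp
        have hlast : (x :: (pvGroupRun x.1 xs).1).getLast? =
            some ((x :: (pvGroupRun x.1 xs).1).getLast hne) := by
          simp [List.getLast?_eq_getLast]
        have hmem := List.getLast_mem hne
        have hkey : ((x :: (pvGroupRun x.1 xs).1).getLast hne).1 = x.1 := by
          rcases List.mem_cons.mp hmem with h | h
          · rw [h]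
          · exact pvGroupRun_keys x.1 xs _ h
        simp [hlast, hkey]
      · exact ih c hc

-- ===== VERDICT (by name: the statement is the Claim_ definition above) =====
theorem specsympt_spec : Claim_equal_specsympt := by
  intro dataset sympt _
  show specsympt dataset sympt = specsympt_alt dataset sympt
  rw [pvA_eq_map, pvB_eq_map]
  exact List.map_congr_left (fun c hc => by rw [pvKeys_agree dataset c hc])
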